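-- pv_equiv track=rewrite | github.com/MinKyeom/KMK-DREAM | Programmers/lv2/석유 시추.py | solution
-- ===== SOURCE A (Python) =====
-- from collections import deque
-- from collections import deque
-- from collections import deque
-- from collections import deque
--
-- def solution(land):
--     n = len(land)  # 깊이(세로)
--     m = len(land[0])  # 폭(가로)
--     dx = [1, 0, 0, -1]
--     dy = [0, 1, -1, 0]
--
--     p = [0 for _ in range(m)]  # 파이프 번호
--
--     v = []  # 방문
--
--     count = 0
--     q = deque([])
--
--     check_p = []  # 파이프 뭉치 체크
--
--     for i in range(n):
--         for j in range(m):
--             if land[i][j] == 1 and not [i, j] in v: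
--                 q.append([i, j])
--                 v.append([i, j])
--                 check_p.append(j)
--
--                 while q:
--                     x, y = q.popleft()
--                     count += 1
--                     for nx, ny in zip(dx, dy):
--                         if 0 <= x + nx < len(land) and 0 <= y + ny < len(land[0]) and land[x + nx][
--                             y + ny] == 1 and not [x + nx, y + ny] in v:
--                             q.append([x + nx, y + ny])
--                             v.append([x + nx, y + ny])
--                             check_p.append(y + ny)
--
--                 for k in list(set(check_p)):
--                     p[k] += count
--
--                 # 초기화
--                 count = 0
--                 q = deque([])
--                 check_p = []
--
--     return max(p)
-- ===== SOURCE B (Python) =====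
-- def solution(land):
--     n, m = len(land), len(land[0])
--     # Connected-component labelling by synchronous min-label propagation:
--     # every oil cell starts labelled with its own linear id i*m+j; each round every
--     # cell takes the minimum label among itself and its oil neighbours.  A minimum
--     # label needs at most n*m rounds to spread through its component, so afterwards
--     # lab[c] == min id of c's component.  Then the answer for column j is the number
--     # of oil cells whose component label occurs in column j.
--     lab = {(i, j): i * m + j for i in range(n) for j in range(m) if land[i][j] == 1}
--     for _ in range(n * m):
--         new = {c: min([v] + [lab[d] for d in ((c[0] + 1, c[1]), (c[0] - 1, c[1]),
--                                               (c[0], c[1] + 1), (c[0], c[1] - 1))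
--                              if d in lab])
--                for c, v in lab.items()}
--         if new == lab:
--             break
--         lab = new
--     vals = list(lab.values())
--     best = 0
--     for j in range(m):
--         cols = {lab[(i, j)] for i in range(n) if (i, j) in lab}
--         best = max(best, sum(vals.count(r) for r in cols))
--     return best
-- ===== Notes on version B (the rewrite author's own statement) =====
-- stated objective: alternative
-- what changed: Replaces the per-seed BFS flood fill (deque, visited list scanned by 'in', per-component count/check_p accumulators, p[k] += count) with global synchronous min-label propagation: every oil cell starts with its own id and each round takes the minimum label among itself and its oil neighbours until a round changes nothing; each column's answer is then recovered by counting the oil cells whose component label occurs in that column, with no traversal, queue or visited structure at all.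
-- outside the precondition, e.g. on solution([]): A raises IndexError, B raises IndexError; on solution([[]]): A raises ValueError, B returns 0; on solution([[1, 1], [1]]): A raises IndexError, B raises IndexError
import Mathlib
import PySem

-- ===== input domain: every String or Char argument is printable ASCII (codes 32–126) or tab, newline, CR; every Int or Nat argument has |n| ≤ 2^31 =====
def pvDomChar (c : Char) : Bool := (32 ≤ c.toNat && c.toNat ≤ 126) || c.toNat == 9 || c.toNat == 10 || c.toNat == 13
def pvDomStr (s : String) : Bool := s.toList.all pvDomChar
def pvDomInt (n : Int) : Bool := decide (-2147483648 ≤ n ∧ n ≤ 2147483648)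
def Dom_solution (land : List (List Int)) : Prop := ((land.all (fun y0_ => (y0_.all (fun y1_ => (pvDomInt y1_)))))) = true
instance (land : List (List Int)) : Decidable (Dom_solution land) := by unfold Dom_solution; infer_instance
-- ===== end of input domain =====

-- B replaces A's per-seed BFS flood fill (deque + visited list + per-component accumulators)
-- with global synchronous min-label propagation: every oil cell starts with its own id and
-- repeatedly takes the minimum label among itself and its oil neighbours; column answers are
-- then recovered by counting equal labels.  Proved: equal results on Pre_solution.


-- `land[x][y]` for indices the programs have already bounds-checked (0 ≤ x < len(land),
-- 0 ≤ y < len(land[0])); the default is only reached on inputs outside Pre_solution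
-- (ragged rows), where the Python raises.  Shared by both ports (same subexpression in both).
def pvGet2 (land : List (List Int)) (x y : Int) : Int :=
  PySem.List.pyGetD (PySem.List.pyGetD land x []) y 0

-- ===== PORT A =====
-- `p[k] += c` (k is always a column index 0 ≤ k < len(p))
def pvBump (p : List Int) (k : Int) (c : Int) : List Int :=
  p.modify k.toNat (· + c)

-- zip(dx, dy) with dx = [1,0,0,-1], dy = [0,1,-1,0]
def pvDxy : List (Int × Int) := [(1, 0), (0, 1), (0, -1), (-1, 0)]

-- body of A's `for nx, ny in zip(dx, dy)` loop; state = (q, v, check_p)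
def pvPushA (land : List (List Int)) (m : Int) (x y : Int)
    (st : List (Int × Int) × List (Int × Int) × List Int) (d : Int × Int) :
    List (Int × Int) × List (Int × Int) × List Int :=
  let nx := x + d.1
  let ny := y + d.2
  if 0 ≤ nx ∧ nx < (land.length : Int) ∧ 0 ≤ ny ∧ ny < m ∧
      pvGet2 land nx ny = 1 ∧ (nx, ny) ∉ st.2.1 then
    (st.1 ++ [(nx, ny)], st.2.1 ++ [(nx, ny)], st.2.2 ++ [ny])
  else st

-- A's `while q:` loop. Python's loop always terminates; `fuel = 2*n*m + 2` is proved
-- sufficient below (pvBfsA_spec), the fuel-0 branch is unreachable.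
def pvBfsA (land : List (List Int)) (m : Int) :
    Nat → List (Int × Int) → List (Int × Int) → Int → List Int →
    List (Int × Int) × Int × List Int
  | 0, _, v, count, cp => (v, count, cp)
  | _ + 1, [], v, count, cp => (v, count, cp)
  | fuel + 1, (x, y) :: q', v, count, cp =>
    let st := pvDxy.foldl (pvPushA land m x y) (q', v, cp)
    pvBfsA land m fuel st.1 st.2.1 (count + 1) st.2.2

-- literal transliteration of A: row-major scan, BFS from each unvisited 1-cell with a
-- visited LIST v, then `for k in list(set(check_p)): p[k] += count`; finally max(p)
-- (`.getD 0` is unreachable under Pre_solution: p is nonempty there).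
def solution (land : List (List Int)) : Int :=
  let n := land.length
  let m : Int := ((PySem.List.pyGetD land 0 []).length : Int)
  let res :=
    (List.range n).foldl (fun st (i : ℕ) =>
      (List.range m.toNat).foldl (fun (st : List Int × List (Int × Int)) (j : ℕ) =>
        if pvGet2 land (i : Int) (j : Int) = 1 ∧ ((i : Int), (j : Int)) ∉ st.2 then
          let r := pvBfsA land m (2 * n * m.toNat + 2)
            [((i : Int), (j : Int))] (st.2 ++ [((i : Int), (j : Int))]) 0 [(j : Int)]
          ((PySem.Set.ofList r.2.2).foldl (fun p k => pvBump p k r.2.1) st.1, r.1)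
        else st) st)
      (List.replicate m.toNat 0, [])
  (PySem.List.max? res.1 (fun z => z)).getD 0

-- ===== PORT B =====
-- ((c[0]+1,c[1]), (c[0]-1,c[1]), (c[0],c[1]+1), (c[0],c[1]-1))
def pvNbrs (c : Int × Int) : List (Int × Int) :=
  [(c.1 + 1, c.2), (c.1 - 1, c.2), (c.1, c.2 + 1), (c.1, c.2 - 1)]

-- one round of B's propagation: the dict comprehension
-- {c: min([v] + [lab[d] for d in nbrs(c) if d in lab]) for c, v in lab.items()}
-- (a dict comprehension is a loop of inserts over lab.items();
--  min([v] + xs) is the left-to-right running minimum started at v)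
def pvRoundB (lab : PySem.Dict (Int × Int) Int) : PySem.Dict (Int × Int) Int :=
  lab.items.foldl (fun d p =>
      d.insert p.1 (((pvNbrs p.1).filterMap (fun q => lab.get? q)).foldl min p.2))
    PySem.Dict.empty

-- B's propagation loop `for _ in range(n*m): new = {...}; if new == lab: break; lab = new`,
-- as fuel recursion over the range's length.  Both dicts always carry the same keys in the
-- same order, so Python's order-insensitive dict == coincides with item-list equality here.
def pvRoundsB : Nat → PySem.Dict (Int × Int) Int → PySem.Dict (Int × Int) Int
  | 0, lab => lab
  | k + 1, lab =>
    let new := pvRoundB lab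
    if new = lab then lab else pvRoundsB k new

-- literal transliteration of B (Source B): initial labels {(i,j): i*m+j}, at most n*m propagation
-- rounds stopping at the first unchanged round, then per column j the sum over the set of
-- labels occurring in column j of vals.count(label), running max starting at 0.
def solution_alt (land : List (List Int)) : Int :=
  let n := land.length
  let m : Int := ((PySem.List.pyGetD land 0 []).length : Int)
  let lab0 : PySem.Dict (Int × Int) Int :=
    (List.range n).foldl (fun d (i : ℕ) =>
      (List.range m.toNat).foldl (fun (d : PySem.Dict (Int × Int) Int) (j : ℕ) =>
        if pvGet2 land (i : Int) (j : Int) = 1 then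
          d.insert ((i : Int), (j : Int)) ((i : Int) * m + (j : Int))
        else d) d)
      PySem.Dict.empty
  let lab := pvRoundsB ((n : Int) * m).toNat lab0
  let vals := lab.values
  (PySem.List.pyRange 0 m 1).foldl (fun best j =>
    let cols := PySem.Set.ofList
      ((PySem.List.pyRange 0 (n : Int) 1).filterMap (fun i => lab.get? (i, j)))
    max best (cols.foldl (fun s r => s + (PySem.List.count vals r : Int)) 0)) 0

-- ===== PRECONDITION & SPEC =====
-- Pre_ excludes exactly the inputs where the Python A raises: empty grid / empty first row
-- (max(p) on [] is a ValueError, len(land[0]) an IndexError) and grids with a row shorter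
-- than the first one (land[i][j] raises IndexError during the row-major scan).
def Pre_solution (land : List (List Int)) : Prop :=
  land ≠ [] ∧ (PySem.List.pyGetD land 0 []).length ≠ 0 ∧
    ∀ row ∈ land, (PySem.List.pyGetD land 0 []).length ≤ row.length

instance (land : List (List Int)) : Decidable (Pre_solution land) := by
  unfold Pre_solution; infer_instance

def pvWitness_solution : List (List Int) := [[1, 0, 1], [1, 1, 0]]

def Spec_solution (land : List (List Int)) (out : Int) : Prop := out = solution_alt land
instance (land : List (List Int)) (out : Int) : Decidable (Spec_solution land out) := by
  unfold Spec_solution; infer_instance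

-- ===== CLAIM (what is proved, stated in full; the proofs are below) =====
def Claim_equal_solution : Prop :=
  ∀ (land : List (List Int)), Dom_solution land → Pre_solution land →
    Spec_solution land (solution land)

-- ===== LEMMAS AND PROOFS =====

-- ---------- basic geometry: good cells, adjacency, reachability ----------

-- cells the programs regard as oil: in-bounds and holding a 1
def pvGood (land : List (List Int)) (m : Int) (c : Int × Int) : Prop :=
  0 ≤ c.1 ∧ c.1 < (land.length : Int) ∧ 0 ≤ c.2 ∧ c.2 < m ∧ pvGet2 land c.1 c.2 = 1

def pvGoodb (land : List (List Int)) (m : Int) (c : Int × Int) : Bool :=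
  decide (0 ≤ c.1 ∧ c.1 < (land.length : Int) ∧ 0 ≤ c.2 ∧ c.2 < m ∧ pvGet2 land c.1 c.2 = 1)

lemma pvGoodb_iff {land : List (List Int)} {m : Int} {c : Int × Int} :
    pvGoodb land m c = true ↔ pvGood land m c := by
  simp [pvGoodb, pvGood]

-- 4-neighbourhood
def pvAdj (c d : Int × Int) : Prop :=
  d = (c.1 + 1, c.2) ∨ d = (c.1 - 1, c.2) ∨ d = (c.1, c.2 + 1) ∨ d = (c.1, c.2 - 1)

-- one flood-fill step: d is a good neighbour of c
def pvRel (land : List (List Int)) (m : Int) (c d : Int × Int) : Prop :=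
  pvGood land m d ∧ pvAdj c d

-- the component of a cell = its reachable set
def pvReach (land : List (List Int)) (m : Int) : (Int × Int) → (Int × Int) → Prop :=
  Relation.ReflTransGen (pvRel land m)

lemma pvAdj_symm {c d : Int × Int} (h : pvAdj c d) : pvAdj d c := by
  rcases h with h | h | h | h <;> subst h <;> simp [pvAdj, Prod.ext_iff]

lemma pvAdj_iff_mem_nbrs {c d : Int × Int} : pvAdj c d ↔ d ∈ pvNbrs c := by
  simp [pvAdj, pvNbrs]

lemma pvReach_good {land : List (List Int)} {m : Int} {a c : Int × Int}
    (h : pvReach land m a c) : c = a ∨ pvGood land m c := by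
  induction h with
  | refl => exact Or.inl rfl
  | tail _ h2 _ => exact Or.inr h2.1

lemma pvReach_good' {land : List (List Int)} {m : Int} {a c : Int × Int}
    (hg : pvGood land m a) (h : pvReach land m a c) : pvGood land m c := by
  rcases pvReach_good h with h | h
  · exact h ▸ hg
  · exact h

lemma pvReach_symm {land : List (List Int)} {m : Int} {c d : Int × Int}
    (hg : pvGood land m c) (h : pvReach land m c d) : pvReach land m d c := by
  induction h with
  | refl => exact Relation.ReflTransGen.refl
  | tail h1 h2 ih =>
    exact Relation.ReflTransGen.head
      ⟨pvReach_good' hg h1, pvAdj_symm h2.2⟩ ih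

-- a Rel-closed set containing no good path start cannot meet the reach set
lemma pvReach_mem_closed {land : List (List Int)} {m : Int} {v : List (Int × Int)}
    {seed c : Int × Int}
    (hcl : ∀ a ∈ v, ∀ d, pvRel land m a d → d ∈ v)
    (hg : pvGood land m seed) (h : pvReach land m seed c) (hc : c ∈ v) : seed ∈ v := by
  induction h with
  | refl => exact hc
  | tail h1 h2 ih =>
    apply ih
    apply hcl _ hc
    refine ⟨?_, pvAdj_symm h2.2⟩
    rcases pvReach_good h1 with h | h
    · exact h ▸ hg
    · exact h

lemma pvReach_subset {land : List (List Int)} {m : Int} {w : List (Int × Int)}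
    {seed c : Int × Int} (hseed : seed ∈ w)
    (hclw : ∀ a ∈ w, ∀ d, pvRel land m a d → d ∈ w) (h : pvReach land m seed c) : c ∈ w := by
  induction h with
  | refl => exact hseed
  | tail _ h2 ih => exact hclw _ ih _ h2

-- a Nodup list of good cells has at most n*m elements
lemma pvLen_le (land : List (List Int)) (m : Int) (v : List (Int × Int))
    (hnd : v.Nodup) (hg : ∀ c ∈ v, pvGood land m c) :
    v.length ≤ land.length * m.toNat := by
  classical
  set f : Int × Int → Nat × Nat := fun c => (c.1.toNat, c.2.toNat) with hf
  have hinj : ∀ x ∈ v, ∀ y ∈ v, f x = f y → x = y := by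
    intro x hx y hy hxy
    have gx := hg x hx
    have gy := hg y hy
    unfold pvGood at gx gy
    have h1 : x.1 = y.1 ∧ x.2 = y.2 := by
      simp only [hf, Prod.ext_iff] at hxy
      omega
    exact Prod.ext_iff.2 h1
  have hmap : (v.map f).Nodup := List.Nodup.map_on hinj hnd
  have hsub : (v.map f).toFinset ⊆
      Finset.range land.length ×ˢ Finset.range m.toNat := by
    intro z hz
    simp only [List.mem_toFinset, List.mem_map] at hz
    obtain ⟨c, hc, hcz⟩ := hz
    have hgc := hg c hc
    unfold pvGood at hgc
    subst hcz
    simp only [Finset.mem_product, Finset.mem_range, hf]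
    omega
  calc v.length = (v.map f).length := (List.length_map ..).symm
    _ = (v.map f).toFinset.card := (List.toFinset_card_of_nodup hmap).symm
    _ ≤ (Finset.range land.length ×ˢ Finset.range m.toNat).card := Finset.card_le_card hsub
    _ = land.length * m.toNat := by simp [Finset.card_product]

lemma pvCard_le (land : List (List Int)) (m : Int) (s : Finset (Int × Int))
    (hg : ∀ c ∈ s, pvGood land m c) : s.card ≤ land.length * m.toNat := by
  rw [← Finset.length_toList]
  exact pvLen_le land m s.toList (Finset.nodup_toList s)
    (fun c hc => hg c (by simpa using hc))

-- ---------- the ball of radius k (the set min-label propagation has reached) ----------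

-- number of propagation rounds B runs
def pvK (land : List (List Int)) (m : Int) : ℕ := land.length * m.toNat

def pvBall (land : List (List Int)) (m : Int) : ℕ → (Int × Int) → Finset (Int × Int)
  | 0, c => {c}
  | k + 1, c => pvBall land m k c ∪
      (((pvNbrs c).filter (fun d => pvGoodb land m d)).toFinset).biUnion (pvBall land m k)

lemma mem_pvBall_succ {land : List (List Int)} {m : Int} {k : ℕ} {c e : Int × Int} :
    e ∈ pvBall land m (k + 1) c ↔
      e ∈ pvBall land m k c ∨
        ∃ d ∈ pvNbrs c, pvGood land m d ∧ e ∈ pvBall land m k d := by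
  simp [pvBall, List.mem_filter, pvGoodb_iff, and_assoc]

lemma pvBall_self (land : List (List Int)) (m : Int) (k : ℕ) (c : Int × Int) :
    c ∈ pvBall land m k c := by
  induction k with
  | zero => simp [pvBall]
  | succ k ih => exact mem_pvBall_succ.2 (Or.inl ih)

lemma pvBall_mono_succ (land : List (List Int)) (m : Int) (k : ℕ) (c : Int × Int) :
    pvBall land m k c ⊆ pvBall land m (k + 1) c :=
  fun _ h => mem_pvBall_succ.2 (Or.inl h)

lemma pvBall_mono (land : List (List Int)) (m : Int) {k l : ℕ} (h : k ≤ l) (c : Int × Int) :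
    pvBall land m k c ⊆ pvBall land m l c := by
  induction l with
  | zero => simpa [Nat.le_zero.1 h]
  | succ l ih =>
    rcases Nat.lt_or_ge k (l + 1) with hl | hl
    · exact (ih (by omega)).trans (pvBall_mono_succ land m l c)
    · have : k = l + 1 := by omega
      subst this
      exact fun _ h => h

lemma pvBall_good {land : List (List Int)} {m : Int} {k : ℕ} {c e : Int × Int}
    (hg : pvGood land m c) (h : e ∈ pvBall land m k c) : pvGood land m e := by
  induction k generalizing c with
  | zero => simp [pvBall] at h; exact h ▸ hg
  | succ k ih =>
    rcases mem_pvBall_succ.1 h with h | ⟨d, _, hd, h⟩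
    · exact ih hg h
    · exact ih hd h

lemma pvBall_subset_reach {land : List (List Int)} {m : Int} {k : ℕ} {c e : Int × Int}
    (hg : pvGood land m c) (h : e ∈ pvBall land m k c) : pvReach land m c e := by
  induction k generalizing c with
  | zero => simp [pvBall] at h; exact h ▸ Relation.ReflTransGen.refl
  | succ k ih =>
    rcases mem_pvBall_succ.1 h with h | ⟨d, hdn, hd, h⟩
    · exact ih hg h
    · exact Relation.ReflTransGen.head ⟨hd, pvAdj_iff_mem_nbrs.2 hdn⟩ (ih hd h)

lemma pvBall_step {land : List (List Int)} {m : Int} {k : ℕ} {c e f : Int × Int}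
    (h : e ∈ pvBall land m k c) (hf : pvGood land m f) (hadj : pvAdj e f) :
    f ∈ pvBall land m (k + 1) c := by
  induction k generalizing c with
  | zero =>
    simp [pvBall] at h
    subst h
    exact mem_pvBall_succ.2 (Or.inr ⟨f, pvAdj_iff_mem_nbrs.1 hadj, hf, pvBall_self _ _ _ _⟩)
  | succ k ih =>
    rcases mem_pvBall_succ.1 h with h | ⟨d, hdn, hd, h⟩
    · exact pvBall_mono_succ land m (k + 1) c (ih h)
    · exact mem_pvBall_succ.2 (Or.inr ⟨d, hdn, hd, ih h⟩)

lemma pvBall_stab {land : List (List Int)} {m : Int} {k : ℕ} {c : Int × Int}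
    (h : pvBall land m (k + 1) c = pvBall land m k c) {e : Int × Int}
    (hr : pvReach land m c e) : e ∈ pvBall land m k c := by
  induction hr with
  | refl => exact pvBall_self _ _ _ _
  | tail h1 h2 ih => exact h ▸ pvBall_step ih h2.1 h2.2

lemma pvBall_growth {land : List (List Int)} {m : Int} {c : Int × Int} :
    ∀ k : ℕ, (∀ j < k, pvBall land m (j + 1) c ≠ pvBall land m j c) →
      k + 1 ≤ (pvBall land m k c).card := by
  intro k
  induction k with
  | zero => intro _; simp [pvBall]
  | succ k ih =>
    intro h
    have h1 : k + 1 ≤ (pvBall land m k c).card := ih (fun j hj => h j (by omega))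
    have h2 : pvBall land m k c ⊂ pvBall land m (k + 1) c :=
      (Finset.ssubset_iff_of_subset (pvBall_mono_succ land m k c)).2 (by
        by_contra hno
        push_neg at hno
        exact h k (by omega) (Finset.Subset.antisymm
          (fun x hx => by
            by_contra hx2
            exact absurd (hno x hx) (by simp [hx2])) (pvBall_mono_succ land m k c)))
    have := Finset.card_lt_card h2
    omega

lemma mem_pvBall_K {land : List (List Int)} {m : Int} {c : Int × Int}
    (hg : pvGood land m c) (e : Int × Int) :
    e ∈ pvBall land m (pvK land m) c ↔ pvReach land m c e := by
  constructor
  · exact pvBall_subset_reach hg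
  · intro hr
    by_cases hstab : ∃ j < pvK land m, pvBall land m (j + 1) c = pvBall land m j c
    · obtain ⟨j, hj, heq⟩ := hstab
      exact pvBall_mono land m (by omega) c (pvBall_stab heq hr)
    · push_neg at hstab
      exfalso
      have hgrow := pvBall_growth (land := land) (m := m) (c := c) (pvK land m) hstab
      have hcard := pvCard_le land m (pvBall land m (pvK land m) c)
        (fun d hd => pvBall_good hg hd)
      unfold pvK at *
      omega



-- ---------- minimum labels ----------

-- the linear id B labels cell (i, j) with: i*m + j
def pvIdm (m : Int) (c : Int × Int) : Int := c.1 * m + c.2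

-- the minimum id within radius k of c (the value min-label propagation holds after k rounds)
def pvM (land : List (List Int)) (m : Int) (k : ℕ) (c : Int × Int) : Int :=
  ((pvBall land m k c).image (pvIdm m)).min'
    ⟨pvIdm m c, Finset.mem_image_of_mem _ (pvBall_self land m k c)⟩

lemma pvM_le {land : List (List Int)} {m : Int} {k : ℕ} {c d : Int × Int}
    (h : d ∈ pvBall land m k c) : pvM land m k c ≤ pvIdm m d :=
  Finset.min'_le _ _ (Finset.mem_image_of_mem _ h)

lemma pvM_mem (land : List (List Int)) (m : Int) (k : ℕ) (c : Int × Int) :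
    ∃ d ∈ pvBall land m k c, pvM land m k c = pvIdm m d := by
  have := Finset.min'_mem ((pvBall land m k c).image (pvIdm m))
    ⟨pvIdm m c, Finset.mem_image_of_mem _ (pvBall_self land m k c)⟩
  rw [Finset.mem_image] at this
  obtain ⟨d, hd, hdm⟩ := this
  exact ⟨d, hd, hdm.symm⟩

lemma pvM_zero (land : List (List Int)) (m : Int) (c : Int × Int) :
    pvM land m 0 c = pvIdm m c := by
  obtain ⟨d, hd, hdm⟩ := pvM_mem land m 0 c
  simp [pvBall] at hd
  rw [hdm, hd]

lemma pvIdm_inj {land : List (List Int)} {m : Int} {c d : Int × Int}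
    (hc : pvGood land m c) (hd : pvGood land m d) (h : pvIdm m c = pvIdm m d) : c = d := by
  obtain ⟨hc1, hc2, hc3, hc4, _⟩ := hc
  obtain ⟨hd1, hd2, hd3, hd4, _⟩ := hd
  unfold pvIdm at h
  have h1 : c.1 = d.1 := by
    rcases lt_trichotomy c.1 d.1 with hlt | heq | hgt
    · exfalso
      have : c.1 * m + m ≤ d.1 * m := by
        have h5 : c.1 + 1 ≤ d.1 := by omega
        nlinarith
      omega
    · exact heq
    · exfalso
      have : d.1 * m + m ≤ c.1 * m := by
        have h5 : d.1 + 1 ≤ c.1 := by omega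
        nlinarith
      omega
  refine Prod.ext_iff.2 ⟨h1, ?_⟩
  rw [h1] at h
  omega

-- the label B's propagation ends with (proved below to be what the port computes)
def pvLab (land : List (List Int)) (m : Int) (c : Int × Int) : Int :=
  pvM land m (pvK land m) c

lemma pvLab_le {land : List (List Int)} {m : Int} {c d : Int × Int}
    (hg : pvGood land m c) (h : pvReach land m c d) : pvLab land m c ≤ pvIdm m d :=
  pvM_le ((mem_pvBall_K hg d).2 h)

lemma pvLab_attained {land : List (List Int)} {m : Int} {c : Int × Int}
    (hg : pvGood land m c) :
    ∃ d, pvReach land m c d ∧ pvLab land m c = pvIdm m d := by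
  obtain ⟨d, hd, hdm⟩ := pvM_mem land m (pvK land m) c
  exact ⟨d, (mem_pvBall_K hg d).1 hd, hdm⟩

lemma pvLab_self_le {land : List (List Int)} {m : Int} {c : Int × Int}
    (hg : pvGood land m c) : pvLab land m c ≤ pvIdm m c :=
  pvLab_le hg Relation.ReflTransGen.refl

lemma pvLab_eq_of_reach {land : List (List Int)} {m : Int} {c d : Int × Int}
    (hc : pvGood land m c) (h : pvReach land m c d) :
    pvLab land m c = pvLab land m d := by
  have hd : pvGood land m d := pvReach_good' hc h
  have hdc : pvReach land m d c := pvReach_symm hc h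
  apply le_antisymm
  · obtain ⟨e, he, hem⟩ := pvLab_attained hd
    rw [hem]
    exact pvLab_le hc (h.trans he)
  · obtain ⟨e, he, hem⟩ := pvLab_attained hc
    rw [hem]
    exact pvLab_le hd (hdc.trans he)

lemma pvLab_eq_iff {land : List (List Int)} {m : Int} {c d : Int × Int}
    (hc : pvGood land m c) (hd : pvGood land m d) :
    pvLab land m c = pvLab land m d ↔ pvReach land m c d := by
  constructor
  · intro h
    obtain ⟨e, he, hem⟩ := pvLab_attained hc
    obtain ⟨e', he', hem'⟩ := pvLab_attained hd
    have hege : pvGood land m e := pvReach_good' hc he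
    have hege' : pvGood land m e' := pvReach_good' hd he'
    have : e = e' := pvIdm_inj hege hege' (by rw [← hem, ← hem', h])
    subst this
    exact he.trans (pvReach_symm hd he')
  · exact pvLab_eq_of_reach hc

-- ---------- B's dictionary: items after each propagation round ----------

-- the keys of B's dict, in insertion order: the good cells, row-major
def pvCells (land : List (List Int)) (m : Int) : List (Int × Int) :=
  (List.range land.length).flatMap (fun i : ℕ =>
    (List.range m.toNat).filterMap (fun j : ℕ =>
      if pvGet2 land (i : Int) (j : Int) = 1 then some ((i : Int), (j : Int)) else none))

lemma mem_pvCells {land : List (List Int)} {m : Int} {c : Int × Int} :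
    c ∈ pvCells land m ↔ pvGood land m c := by
  constructor
  · intro hc
    rw [pvCells, List.mem_flatMap] at hc
    obtain ⟨i, hi, hc⟩ := hc
    rw [List.mem_filterMap] at hc
    obtain ⟨j, hj, hcj⟩ := hc
    rw [List.mem_range] at hi hj
    split_ifs at hcj with hget
    · cases hcj
      exact ⟨by simp, by simp; omega, by simp, by simp; omega, hget⟩
  · intro hc
    obtain ⟨h1, h2, h3, h4, h5⟩ := hc
    rw [pvCells, List.mem_flatMap]
    refine ⟨c.1.toNat, by rw [List.mem_range]; omega, ?_⟩
    rw [List.mem_filterMap]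
    refine ⟨c.2.toNat, by rw [List.mem_range]; omega, ?_⟩
    have e1 : ((c.1.toNat : Int)) = c.1 := by omega
    have e2 : ((c.2.toNat : Int)) = c.2 := by omega
    rw [e1, e2, if_pos h5]

lemma nodup_pvCells (land : List (List Int)) (m : Int) : (pvCells land m).Nodup := by
  rw [pvCells, List.nodup_flatMap]
  refine ⟨?_, ?_⟩
  · intro i _
    refine List.Nodup.filterMap ?_ List.nodup_range
    intro a a' b hb hb'
    split_ifs at hb hb' with h1 h2 <;> simp at hb hb'
    rw [← hb] at hb'
    have h2 : (a' : Int) = (a : Int) := (Prod.ext_iff.1 hb').2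
    have := h2.symm
    exact_mod_cast this
  · refine List.Pairwise.imp ?_ List.pairwise_lt_range
    intro i i' hii c hc hc'
    rw [List.mem_filterMap] at hc hc'
    obtain ⟨j, _, hj⟩ := hc
    obtain ⟨j', _, hj'⟩ := hc'
    split_ifs at hj hj' <;> simp at hj hj'
    rw [← hj] at hj'
    have h2 : (i' : Int) = (i : Int) := (Prod.ext_iff.1 hj').1
    have : i = i' := by exact_mod_cast h2.symm
    omega

-- B's initial dict {(i,j): i*m+j for i in range(n) for j in range(m) if land[i][j] == 1}
lemma pvInit_items (land : List (List Int)) (m : Int) :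
    ((List.range land.length).foldl (fun d (i : ℕ) =>
      (List.range m.toNat).foldl (fun (d : PySem.Dict (Int × Int) Int) (j : ℕ) =>
        if pvGet2 land (i : Int) (j : Int) = 1 then
          d.insert ((i : Int), (j : Int)) ((i : Int) * m + (j : Int))
        else d) d)
      PySem.Dict.empty).items = (pvCells land m).map (fun c => (c, pvIdm m c)) := by
  suffices h : ∀ n : ℕ,
      ((List.range n).foldl (fun d (i : ℕ) =>
        (List.range m.toNat).foldl (fun (d : PySem.Dict (Int × Int) Int) (j : ℕ) =>
          if pvGet2 land (i : Int) (j : Int) = 1 then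
            d.insert ((i : Int), (j : Int)) ((i : Int) * m + (j : Int))
          else d) d)
        PySem.Dict.empty).items =
      ((List.range n).flatMap (fun i : ℕ =>
        (List.range m.toNat).filterMap (fun j : ℕ =>
          if pvGet2 land (i : Int) (j : Int) = 1 then
            some ((i : Int), (j : Int)) else none))).map
        (fun c => (c, pvIdm m c)) by
    rw [pvCells]
    exact h land.length
  intro n
  induction n with
  | zero =>
    simp only [List.range_zero, List.foldl_nil, List.flatMap_nil, List.map_nil]
    rfl
  | succ n ih =>
    rw [List.range_succ, List.foldl_append, List.flatMap_append]
    simp only [List.foldl_cons, List.foldl_nil, List.flatMap_cons, List.flatMap_nil,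
      List.append_nil, List.map_append]
    rw [PySem.List.foldl_ite_eq_foldl_filter
      (p := fun j : ℕ => pvGet2 land (n : Int) (j : Int) = 1)
      (f := fun (d : PySem.Dict (Int × Int) Int) (j : ℕ) =>
        d.insert ((n : Int), (j : Int)) ((n : Int) * m + (j : Int)))]
    have hkeys : ((List.range n).foldl (fun d (i : ℕ) =>
        (List.range m.toNat).foldl (fun (d : PySem.Dict (Int × Int) Int) (j : ℕ) =>
          if pvGet2 land (i : Int) (j : Int) = 1 then
            d.insert ((i : Int), (j : Int)) ((i : Int) * m + (j : Int))
          else d) d)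
        PySem.Dict.empty).keys =
        ((List.range n).flatMap (fun i : ℕ =>
          (List.range m.toNat).filterMap (fun j : ℕ =>
            if pvGet2 land (i : Int) (j : Int) = 1 then
              some ((i : Int), (j : Int)) else none))) := by
      show _root_.List.map (fun p : (Int × Int) × Int => p.1) _ = _
      rw [ih, List.map_map]
      have hco : ((fun p : (Int × Int) × Int => p.1) ∘ fun c => (c, pvIdm m c)) =
          (id : Int × Int → Int × Int) := rfl
      rw [hco, List.map_id]
    have hfresh : ∀ j ∈ (List.range m.toNat).filter
        (fun j : ℕ => decide (pvGet2 land (n : Int) (j : Int) = 1)),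
        ((List.range n).foldl (fun d (i : ℕ) =>
          (List.range m.toNat).foldl (fun (d : PySem.Dict (Int × Int) Int) (j : ℕ) =>
            if pvGet2 land (i : Int) (j : Int) = 1 then
              d.insert ((i : Int), (j : Int)) ((i : Int) * m + (j : Int))
            else d) d)
          PySem.Dict.empty).contains ((n : Int), (j : Int)) = false := by
      intro j _
      rw [PySem.Dict.contains_eq_decide_mem_keys, hkeys]
      simp only [decide_eq_false_iff_not]
      intro hmem
      rw [List.mem_flatMap] at hmem
      obtain ⟨i, hi, hmem⟩ := hmem
      rw [List.mem_filterMap] at hmem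
      obtain ⟨j', _, hj'⟩ := hmem
      rw [List.mem_range] at hi
      split_ifs at hj' <;> simp at hj'
      obtain ⟨h1, -⟩ := hj'
      omega
    have hnd : (((List.range m.toNat).filter
        (fun j : ℕ => decide (pvGet2 land (n : Int) (j : Int) = 1))).map
        (fun j : ℕ => ((n : Int), (j : Int)))).Nodup := by
      refine List.Nodup.map ?_ (List.Nodup.filter _ List.nodup_range)
      intro a b hab
      have : (a : Int) = (b : Int) := (Prod.ext_iff.1 hab).2
      exact_mod_cast this
    rw [PySem.Dict.items_foldl_insert_fresh _ (fun j : ℕ => ((n : Int), (j : Int)))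
      (fun j : ℕ => ((n : Int) * m + (j : Int))) _ hfresh hnd, ih]
    congr 1
    have hrow : ∀ l : List ℕ,
        ((l.filter (fun j : ℕ => decide (pvGet2 land (n : Int) (j : Int) = 1))).map
          (fun j : ℕ => (((n : Int), (j : Int)), (n : Int) * m + (j : Int)))) =
        ((l.filterMap (fun j : ℕ => if pvGet2 land (n : Int) (j : Int) = 1 then
            some ((n : Int), (j : Int)) else none)).map (fun c => (c, pvIdm m c))) := by
      intro l
      induction l with
      | nil => rfl
      | cons x t iht =>
        by_cases hx : pvGet2 land (n : Int) (x : Int) = 1 <;>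
          simp [hx, iht, pvIdm]
    exact hrow _

-- lookups in a dict whose items are (c, f c) over pvCells
lemma pvDictGet_good {land : List (List Int)} {m : Int} {f : Int × Int → Int}
    {lab : PySem.Dict (Int × Int) Int}
    (h : lab.items = (pvCells land m).map (fun c => (c, f c)))
    {c : Int × Int} (hc : pvGood land m c) : lab.get? c = some (f c) := by
  apply PySem.Dict.get?_of_mem_items
  · rw [h, List.mem_map]
    exact ⟨c, mem_pvCells.2 hc, rfl⟩
  · show (lab.items.map (·.1)).Nodup
    rw [h, List.map_map]
    have hco : ((fun p : (Int × Int) × Int => p.1) ∘ fun c => (c, f c)) =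
        (id : Int × Int → Int × Int) := rfl
    rw [hco, List.map_id]
    exact nodup_pvCells land m

lemma pvDictGet_bad {land : List (List Int)} {m : Int} {f : Int × Int → Int}
    {lab : PySem.Dict (Int × Int) Int}
    (h : lab.items = (pvCells land m).map (fun c => (c, f c)))
    {c : Int × Int} (hc : ¬ pvGood land m c) : lab.get? c = none := by
  rw [PySem.Dict.get?_eq_none_iff_contains, PySem.Dict.contains_eq_decide_mem_keys]
  show decide (c ∈ lab.items.map (·.1)) = false
  rw [h, List.map_map]
  simp only [decide_eq_false_iff_not, List.mem_map, Function.comp]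
  rintro ⟨d, hd, rfl⟩
  exact hc (mem_pvCells.1 hd)

-- one propagation round sends the stored value pvM k to pvM (k+1)
lemma pvRoundVal_eq {land : List (List Int)} {m : Int} {k : ℕ}
    {lab : PySem.Dict (Int × Int) Int}
    (h : lab.items = (pvCells land m).map (fun c => (c, pvM land m k c)))
    {c : Int × Int} (hc : pvGood land m c) :
    ((pvNbrs c).filterMap (fun q => lab.get? q)).foldl min (pvM land m k c)
      = pvM land m (k + 1) c := by
  set L := (pvNbrs c).filterMap (fun q => lab.get? q) with hL
  have hmem : ∀ x, x ∈ L ↔ ∃ d ∈ pvNbrs c, pvGood land m d ∧ x = pvM land m k d := by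
    intro x
    simp only [hL, List.mem_filterMap]
    constructor
    · rintro ⟨d, hd, hval⟩
      by_cases hgd : pvGood land m d
      · rw [pvDictGet_good h hgd] at hval
        exact ⟨d, hd, hgd, (Option.some_inj.1 hval).symm⟩
      · rw [pvDictGet_bad h hgd] at hval
        cases hval
    · rintro ⟨d, hd, hgd, rfl⟩
      exact ⟨d, hd, by rw [pvDictGet_good h hgd]⟩
  set r := L.foldl min (pvM land m k c) with hr
  have hle := PySem.List.foldl_min_le L (pvM land m k c)
  have hm := PySem.List.foldl_min_mem L (pvM land m k c)
  have hattain : ∃ e ∈ pvBall land m (k + 1) c, r = pvIdm m e := by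
    rcases hm with hm | hm
    · obtain ⟨e, he, hem⟩ := pvM_mem land m k c
      refine ⟨e, pvBall_mono_succ land m k c he, ?_⟩
      rw [← hr] at hm
      rw [hm, hem]
    · obtain ⟨d, hd, hgd, hx⟩ := (hmem r).1 hm
      obtain ⟨e, he, hem⟩ := pvM_mem land m k d
      exact ⟨e, mem_pvBall_succ.2 (Or.inr ⟨d, hd, hgd, he⟩), by rw [hx, hem]⟩
  have hlb : ∀ e ∈ pvBall land m (k + 1) c, r ≤ pvIdm m e := by
    intro e he
    rcases mem_pvBall_succ.1 he with he | ⟨d, hd, hgd, he⟩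
    · exact le_trans hle.1 (pvM_le he)
    · exact le_trans (hle.2 _ ((hmem _).2 ⟨d, hd, hgd, rfl⟩)) (pvM_le he)
  obtain ⟨e, he, hem⟩ := hattain
  obtain ⟨e', he', hem'⟩ := pvM_mem land m (k + 1) c
  exact le_antisymm (hem' ▸ hlb e' he') (hem ▸ pvM_le he)

-- one round on a dict in canonical form
lemma pvRoundB_items {land : List (List Int)} {m : Int} {k : ℕ}
    {lab : PySem.Dict (Int × Int) Int}
    (h : lab.items = (pvCells land m).map (fun c => (c, pvM land m k c))) :
    (pvRoundB lab).items = (pvCells land m).map (fun c => (c, pvM land m (k + 1) c)) := by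
  unfold pvRoundB
  have hfresh : ∀ p ∈ lab.items, (PySem.Dict.empty : PySem.Dict (Int × Int) Int).contains p.1 = false :=
    fun p _ => PySem.Dict.contains_empty _
  have hnd : (lab.items.map (fun p : (Int × Int) × Int => p.1)).Nodup := by
    rw [h, List.map_map]
    have hco : ((fun p : (Int × Int) × Int => p.1) ∘ fun c => (c, pvM land m k c)) =
        (id : Int × Int → Int × Int) := rfl
    rw [hco, List.map_id]
    exact nodup_pvCells land m
  rw [PySem.Dict.items_foldl_insert_fresh lab.items (fun p : (Int × Int) × Int => p.1)
    (fun p : (Int × Int) × Int =>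
      ((pvNbrs p.1).filterMap (fun q => lab.get? q)).foldl min p.2) _ hfresh hnd]
  have hemp : (PySem.Dict.empty : PySem.Dict (Int × Int) Int).items = [] := rfl
  rw [hemp, List.nil_append]
  conv_lhs => rw [h]
  rw [List.map_map]
  refine List.map_congr_left ?_
  intro c hcm
  have hc : pvGood land m c := mem_pvCells.1 hcm
  simp only [Function.comp]
  rw [pvRoundVal_eq h hc]

-- B's dict after k rounds
lemma pvLabK_items (land : List (List Int)) (m : Int) : ∀ k : ℕ,
    (pvRoundB^[k] ((List.range land.length).foldl (fun d (i : ℕ) =>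
      (List.range m.toNat).foldl (fun (d : PySem.Dict (Int × Int) Int) (j : ℕ) =>
        if pvGet2 land (i : Int) (j : Int) = 1 then
          d.insert ((i : Int), (j : Int)) ((i : Int) * m + (j : Int))
        else d) d)
      PySem.Dict.empty)).items = (pvCells land m).map (fun c => (c, pvM land m k c)) := by
  intro k
  induction k with
  | zero =>
    rw [Function.iterate_zero_apply, pvInit_items]
    exact List.map_congr_left (fun c _ => by rw [pvM_zero])
  | succ k ih =>
    rw [Function.iterate_succ_apply', pvRoundB_items ih]


-- ---------- A's BFS: characterization of one flood fill (as in the flood-fill port) ----------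

lemma pvAdj_dxy (x y : Int) : ∀ d ∈ pvDxy, pvAdj (x, y) (x + d.1, y + d.2) := by
  intro d hd
  simp only [pvDxy, List.mem_cons, List.not_mem_nil, or_false] at hd
  rcases hd with rfl | rfl | rfl | rfl <;> simp [pvAdj, Prod.ext_iff] <;> omega

lemma pvAdj_to_dxy {x y : Int} {e : Int × Int} (h : pvAdj (x, y) e) :
    ∃ d ∈ pvDxy, e = (x + d.1, y + d.2) := by
  rcases h with h | h | h | h <;> subst h
  · exact ⟨(1, 0), by simp [pvDxy], by simp⟩
  · exact ⟨(-1, 0), by simp [pvDxy], by simp [Prod.ext_iff]; omega⟩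
  · exact ⟨(0, 1), by simp [pvDxy], by simp⟩
  · exact ⟨(0, -1), by simp [pvDxy], by simp [Prod.ext_iff]; omega⟩

lemma pvPushA_fold (land : List (List Int)) (m : Int) (x y : Int) :
    ∀ (ds : List (Int × Int)) (q v : List (Int × Int)) (cp : List Int),
    v.Nodup →
    (∀ d ∈ ds, pvAdj (x, y) (x + d.1, y + d.2)) →
    ∃ Δ, ds.foldl (pvPushA land m x y) (q, v, cp) = (q ++ Δ, v ++ Δ, cp ++ Δ.map Prod.snd)
      ∧ (v ++ Δ).Nodup
      ∧ (∀ c ∈ Δ, pvGood land m c ∧ pvAdj (x, y) c)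
      ∧ (∀ d ∈ ds, pvGood land m (x + d.1, y + d.2) → (x + d.1, y + d.2) ∈ v ++ Δ) := by
  intro ds
  induction ds with
  | nil =>
    intro q v cp hnd _
    exact ⟨[], by simp, by simpa using hnd, by simp, by simp⟩
  | cons d ds ih =>
    intro q v cp hnd hadj
    simp only [List.foldl_cons]
    by_cases hc : 0 ≤ x + d.1 ∧ x + d.1 < (land.length : Int) ∧ 0 ≤ y + d.2 ∧ y + d.2 < m ∧
        pvGet2 land (x + d.1) (y + d.2) = 1 ∧ (x + d.1, y + d.2) ∉ v
    · have hstep : pvPushA land m x y (q, v, cp) d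
          = (q ++ [(x + d.1, y + d.2)], v ++ [(x + d.1, y + d.2)], cp ++ [y + d.2]) := by
        unfold pvPushA
        simp only [if_pos hc]
      rw [hstep]
      have hnd1 : (v ++ [(x + d.1, y + d.2)]).Nodup := by
        simp only [List.nodup_append, hnd, List.nodup_cons, List.not_mem_nil,
          not_false_eq_true, List.nodup_nil, and_self, true_and, List.mem_singleton]
        intro a ha b hb hab
        subst hb
        subst hab
        exact hc.2.2.2.2.2 ha
      obtain ⟨Δ, heq, hnd2, hgood, hcov⟩ :=
        ih (q ++ [(x + d.1, y + d.2)]) (v ++ [(x + d.1, y + d.2)]) (cp ++ [y + d.2]) hnd1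
          (fun e he => hadj e (by simp [he]))
      refine ⟨(x + d.1, y + d.2) :: Δ, ?_, ?_, ?_, ?_⟩
      · rw [heq]
        simp [List.append_assoc]
      · rw [show v ++ (x + d.1, y + d.2) :: Δ = (v ++ [(x + d.1, y + d.2)]) ++ Δ by simp]
        exact hnd2
      · intro c hcm
        rcases List.mem_cons.1 hcm with rfl | hcm
        · refine ⟨?_, hadj d (by simp)⟩
          unfold pvGood
          exact ⟨hc.1, hc.2.1, hc.2.2.1, hc.2.2.2.1, hc.2.2.2.2.1⟩
        · exact hgood c hcm
      · intro e he hge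
        rcases List.mem_cons.1 he with rfl | he
        · simp
        · have := hcov e he hge
          rw [show v ++ (x + d.1, y + d.2) :: Δ = (v ++ [(x + d.1, y + d.2)]) ++ Δ by simp]
          exact this
    · have hstep : pvPushA land m x y (q, v, cp) d = (q, v, cp) := by
        unfold pvPushA
        simp only [if_neg hc]
      rw [hstep]
      obtain ⟨Δ, heq, hnd2, hgood, hcov⟩ := ih q v cp hnd (fun e he => hadj e (by simp [he]))
      refine ⟨Δ, heq, hnd2, hgood, ?_⟩
      intro e he hge
      rcases List.mem_cons.1 he with rfl | he
      · have hmem : (x + e.1, y + e.2) ∈ v := by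
          by_contra hnm
          unfold pvGood at hge
          exact hc ⟨hge.1, hge.2.1, hge.2.2.1, hge.2.2.2.1, hge.2.2.2.2, hnm⟩
        exact List.mem_append_left _ hmem
      · exact hcov e he hge

lemma pvBfsA_spec (land : List (List Int)) (m : Int) (S : Int × Int → Prop)
    (hSc : ∀ c d, S c → pvRel land m c d → S d) :
    ∀ (fuel : Nat) (q v : List (Int × Int)) (count : Int) (cp : List Int),
    q.length + 2 * (land.length * m.toNat - v.length) < fuel →
    v.Nodup →
    (∀ c ∈ q, c ∈ v) →
    (∀ c ∈ v, pvGood land m c) →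
    (∀ c ∈ v, c ∉ q → ∀ d, pvRel land m c d → d ∈ v) →
    (∀ c ∈ v, S c) →
    ∃ Δ, pvBfsA land m fuel q v count cp
        = (v ++ Δ, count + (q.length : Int) + (Δ.length : Int), cp ++ Δ.map Prod.snd)
      ∧ (v ++ Δ).Nodup
      ∧ (∀ c ∈ v ++ Δ, pvGood land m c)
      ∧ (∀ c ∈ v ++ Δ, S c)
      ∧ (∀ c ∈ v ++ Δ, ∀ d, pvRel land m c d → d ∈ v ++ Δ) := by
  intro fuel
  induction fuel with
  | zero => intro q v count cp hfuel; omega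
  | succ fuel ih =>
    intro q v count cp hfuel hnd hq hvg hcl hS
    rcases q with _ | ⟨⟨x, y⟩, q'⟩
    · refine ⟨[], by simp [pvBfsA], by simpa using hnd, by simpa using hvg, by simpa using hS, ?_⟩
      intro c hc d hrel
      exact List.mem_append_left _ (hcl c (by simpa using hc) (by simp) d hrel)
    · obtain ⟨Δ₀, heq0, hnd0, hgood0, hcov0⟩ :=
        pvPushA_fold land m x y pvDxy q' v cp hnd (pvAdj_dxy x y)
      have hxyv : (x, y) ∈ v := hq (x, y) (by simp)
      have hlen : (v ++ Δ₀).length ≤ land.length * m.toNat :=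
        pvLen_le land m (v ++ Δ₀) hnd0
          (fun c hc => (List.mem_append.1 hc).elim (hvg c) (fun h => (hgood0 c h).1))
      have hfuel' : (q' ++ Δ₀).length + 2 * (land.length * m.toNat - (v ++ Δ₀).length) < fuel := by
        simp only [List.length_append, List.length_cons] at *
        omega
      have hq' : ∀ c ∈ q' ++ Δ₀, c ∈ v ++ Δ₀ := by
        intro c hc
        rcases List.mem_append.1 hc with h | h
        · exact List.mem_append_left _ (hq c (by simp [h]))
        · exact List.mem_append_right _ h
      have hvg' : ∀ c ∈ v ++ Δ₀, pvGood land m c :=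
        fun c hc => (List.mem_append.1 hc).elim (hvg c) (fun h => (hgood0 c h).1)
      have hcl' : ∀ c ∈ v ++ Δ₀, c ∉ q' ++ Δ₀ → ∀ d, pvRel land m c d → d ∈ v ++ Δ₀ := by
        intro c hc hcq d hrel
        by_cases hcx : c = (x, y)
        · subst hcx
          obtain ⟨dd, hdd, rfl⟩ := pvAdj_to_dxy hrel.2
          exact hcov0 dd hdd hrel.1
        · rcases List.mem_append.1 hc with h | h
          · have : c ∉ (x, y) :: q' := by
              simp only [List.mem_cons, not_or]
              exact ⟨hcx, fun hh => hcq (List.mem_append_left _ hh)⟩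
            exact List.mem_append_left _ (hcl c h this d hrel)
          · exact absurd (List.mem_append_right q' h) hcq
      have hS' : ∀ c ∈ v ++ Δ₀, S c := by
        intro c hc
        rcases List.mem_append.1 hc with h | h
        · exact hS c h
        · exact hSc (x, y) c (hS _ hxyv) ⟨(hgood0 c h).1, (hgood0 c h).2⟩
      obtain ⟨Δ₁, heq1, hnd1, hvg1, hS1, hcl1⟩ :=
        ih (q' ++ Δ₀) (v ++ Δ₀) (count + 1) (cp ++ Δ₀.map Prod.snd) hfuel' hnd0 hq' hvg' hcl' hS'
      have hstep : pvBfsA land m (fuel + 1) ((x, y) :: q') v count cp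
          = pvBfsA land m fuel (q' ++ Δ₀) (v ++ Δ₀) (count + 1) (cp ++ Δ₀.map Prod.snd) := by
        show pvBfsA land m fuel
          (pvDxy.foldl (pvPushA land m x y) (q', v, cp)).1
          (pvDxy.foldl (pvPushA land m x y) (q', v, cp)).2.1 (count + 1)
          (pvDxy.foldl (pvPushA land m x y) (q', v, cp)).2.2 = _
        rw [heq0]
      refine ⟨Δ₀ ++ Δ₁, ?_, by simpa [List.append_assoc] using hnd1,
        by simpa [List.append_assoc] using hvg1, by simpa [List.append_assoc] using hS1,
        by simpa [List.append_assoc] using hcl1⟩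
      rw [hstep, heq1]
      refine Prod.ext (by simp [List.append_assoc]) (Prod.ext ?_ (by simp [List.append_assoc]))
      simp only [List.length_append, List.length_cons]
      push_cast
      ring

lemma pvComponentA (land : List (List Int)) (m : Int) (seed : Int × Int)
    (v : List (Int × Int))
    (hg : pvGood land m seed) (hns : seed ∉ v) (hnd : v.Nodup)
    (hvg : ∀ c ∈ v, pvGood land m c)
    (hcl : ∀ c ∈ v, ∀ d, pvRel land m c d → d ∈ v) :
    ∃ Δ, pvBfsA land m (2 * land.length * m.toNat + 2) [seed] (v ++ [seed]) 0 [seed.2]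
        = (v ++ seed :: Δ, 1 + (Δ.length : Int), (seed :: Δ).map Prod.snd)
      ∧ (v ++ seed :: Δ).Nodup
      ∧ (∀ c ∈ v ++ seed :: Δ, pvGood land m c)
      ∧ (∀ c ∈ v ++ seed :: Δ, ∀ d, pvRel land m c d → d ∈ v ++ seed :: Δ)
      ∧ (∀ c, c ∈ seed :: Δ ↔ pvReach land m seed c) := by
  have hSc : ∀ c d, (c ∈ v ∨ pvReach land m seed c) → pvRel land m c d →
      (d ∈ v ∨ pvReach land m seed d) := by
    intro c d hc hrel
    rcases hc with hc | hc
    · exact Or.inl (hcl c hc d hrel)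
    · exact Or.inr (hc.tail hrel)
  have hnd1 : (v ++ [seed]).Nodup := by
    simp only [List.nodup_append, hnd, List.nodup_cons, List.not_mem_nil,
      not_false_eq_true, List.nodup_nil, and_self, true_and, List.mem_singleton]
    intro a ha b hb
    subst hb
    intro heq
    exact hns (heq ▸ ha)
  have hvg1 : ∀ c ∈ v ++ [seed], pvGood land m c := by
    intro c hc
    rcases List.mem_append.1 hc with h | h
    · exact hvg c h
    · simpa [List.mem_singleton.1 h]
  have hlen1 : (v ++ [seed]).length ≤ land.length * m.toNat := pvLen_le land m _ hnd1 hvg1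
  obtain ⟨Δ, heq, hnd', hvg', hS', hcl'⟩ :=
    pvBfsA_spec land m (fun c => c ∈ v ∨ pvReach land m seed c) hSc
      (2 * land.length * m.toNat + 2) [seed] (v ++ [seed]) 0 [seed.2]
      (by
        have hassoc : 2 * land.length * m.toNat = 2 * (land.length * m.toNat) :=
          Nat.mul_assoc 2 _ _
        simp only [List.length_append, List.length_cons, List.length_nil] at *
        omega)
      hnd1
      (by intro c hc; exact List.mem_append_right _ (by simpa using hc))
      hvg1
      (by intro c hc hcs d hrel
          rcases List.mem_append.1 hc with h | h
          · exact List.mem_append_left _ (hcl c h d hrel)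
          · exact absurd (by simpa using h) (by simpa using hcs))
      (by intro c hc; rcases List.mem_append.1 hc with h | h
          · exact Or.inl h
          · right; rw [show c = seed from by simpa using h]; exact Relation.ReflTransGen.refl)
  have hshape : v ++ [seed] ++ Δ = v ++ seed :: Δ := by simp
  rw [hshape] at heq hnd' hvg' hS' hcl'
  refine ⟨Δ, ?_, hnd', hvg', hcl', ?_⟩
  · rw [heq]
    refine Prod.ext rfl (Prod.ext (by simp) (by simp))
  · intro c
    constructor
    · intro hc
      rcases hS' c (List.mem_append_right _ hc) with h | h
      · exfalso
        have hdisj := (List.nodup_append.1 hnd').2.2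
        exact hdisj c h c hc rfl
      · exact h
    · intro hr
      have hcw : c ∈ v ++ seed :: Δ :=
        pvReach_subset (by simp) hcl' hr
      rcases List.mem_append.1 hcw with h | h
      · exact absurd (pvReach_mem_closed hcl hg hr h) hns
      · exact h

-- ---------- A's row-major scan: functional invariant ----------

-- id decomposition is unique once the column is a residue mod m
lemma pvIdm_inj' {m : Int} {c d : Int × Int} (hc2 : 0 ≤ c.2) (hc2' : c.2 < m)
    (hd2 : 0 ≤ d.2) (hd2' : d.2 < m) (h : pvIdm m c = pvIdm m d) : c = d := by
  unfold pvIdm at h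
  have h1 : c.1 = d.1 := by
    rcases lt_trichotomy c.1 d.1 with hlt | heq | hgt
    · exfalso
      have h5 : c.1 + 1 ≤ d.1 := by omega
      nlinarith
    · exact heq
    · exfalso
      have h5 : d.1 + 1 ≤ c.1 := by omega
      nlinarith
  refine Prod.ext_iff.2 ⟨h1, ?_⟩
  rw [h1] at h
  omega

lemma pvIdm_nonneg {land : List (List Int)} {m : Int} {c : Int × Int}
    (hg : pvGood land m c) : 0 ≤ pvIdm m c := by
  obtain ⟨h1, _, h3, h4, _⟩ := hg
  have := mul_nonneg h1 (le_trans h3 (le_of_lt h4))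
  unfold pvIdm
  omega

lemma pvLab_nonneg {land : List (List Int)} {m : Int} {c : Int × Int}
    (hg : pvGood land m c) : 0 ≤ pvLab land m c := by
  obtain ⟨d, hd, hdm⟩ := pvLab_attained hg
  rw [hdm]
  exact pvIdm_nonneg (pvReach_good' hg hd)

-- `for k in list(set(check_p)): p[k] += count`, entrywise
lemma pvBumpFold_getElem? (cnt : Int) : ∀ (ks : List Int) (p : List Int), ks.Nodup →
    (∀ k ∈ ks, 0 ≤ k) → ∀ j : ℕ,
    (ks.foldl (fun p k => pvBump p k cnt) p)[j]? =
      if (j : Int) ∈ ks then p[j]?.map (· + cnt) else p[j]? := by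
  intro ks
  induction ks with
  | nil => intro p _ _ j; simp
  | cons k t ih =>
    intro p hnd hk j
    simp only [List.foldl_cons]
    rw [ih _ (List.nodup_cons.1 hnd).2 (fun x hx => hk x (List.mem_cons_of_mem _ hx))]
    have hk0 : 0 ≤ k := hk k List.mem_cons_self
    by_cases hjk : (j : Int) = k
    · have hjt : (j : Int) ∉ t := by rw [hjk]; exact (List.nodup_cons.1 hnd).1
      rw [if_neg hjt, if_pos (List.mem_cons.2 (Or.inl hjk))]
      unfold pvBump
      rw [List.getElem?_modify]
      have hkj : k.toNat = j := by omega
      simp [hkj]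
    · have hmod : (pvBump p k cnt)[j]? = p[j]? := by
        unfold pvBump
        rw [List.getElem?_modify]
        have hne : ¬ (k.toNat = j) := by omega
        simp [hne]
      rw [hmod]
      by_cases hjt : (j : Int) ∈ t
      · rw [if_pos hjt, if_pos (List.mem_cons.2 (Or.inr hjt))]
      · rw [if_neg hjt, if_neg (by simp [List.mem_cons, hjk, hjt])]

lemma pvBumpFold_length (cnt : Int) : ∀ (ks : List Int) (p : List Int),
    (ks.foldl (fun p k => pvBump p k cnt) p).length = p.length := by
  intro ks
  induction ks with
  | nil => intro p; rfl
  | cons k t ih =>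
    intro p
    rw [List.foldl_cons, ih]
    simp [pvBump]

-- the summand bookkeeping for A's p[j]
def pvSeedb (land : List (List Int)) (m : Int) (s : Int × Int) : Bool :=
  decide (pvLab land m s = pvIdm m s)

def pvTouchb (land : List (List Int)) (m : Int) (s : Int × Int) (j : ℕ) : Bool :=
  decide ((j : Int) ∈ (pvBall land m (pvK land m) s).image Prod.snd)

def pvSizeI (land : List (List Int)) (m : Int) (s : Int × Int) : Int :=
  ((pvBall land m (pvK land m) s).card : Int)

-- what p[j] holds after the scan has passed the first t cells: the total size of the
-- components whose seed has id < t and which touch column j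
def pvColSum (land : List (List Int)) (m : Int) (t : ℕ) (j : ℕ) : Int :=
  (((pvCells land m).filter (fun s => pvSeedb land m s && pvTouchb land m s j &&
      decide (pvIdm m s < (t : Int)))).map (pvSizeI land m)).sum

lemma pvSumFilter {α : Type} (p : α → Bool) (f : α → Int) : ∀ l : List α,
    ((l.filter p).map f).sum = (l.map (fun s => if p s then f s else 0)).sum := by
  intro l
  induction l with
  | nil => rfl
  | cons x t ih =>
    by_cases hx : p x <;> simp [hx, ih]

lemma pvSumZero {α : Type} (g : α → Int) : ∀ l : List α, (∀ s ∈ l, g s = 0) →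
    (l.map g).sum = 0 := by
  intro l
  induction l with
  | nil => intro _; rfl
  | cons x t ih =>
    intro h
    simp [h x List.mem_cons_self, ih (fun s hs => h s (List.mem_cons_of_mem _ hs))]

lemma pvSumSingle {α : Type} [DecidableEq α] (g : α → Int) : ∀ (l : List α), l.Nodup →
    ∀ c ∈ l, (∀ s ∈ l, s ≠ c → g s = 0) → (l.map g).sum = g c := by
  intro l
  induction l with
  | nil => intro _ c hc; cases hc
  | cons x t ih =>
    intro hnd c hc h0
    rcases List.mem_cons.1 hc with rfl | hct
    · simp only [List.map_cons, List.sum_cons]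
      rw [pvSumZero g t (fun s hs => h0 s (List.mem_cons_of_mem _ hs)
        (fun hsc => (List.nodup_cons.1 hnd).1 (hsc ▸ hs)))]
      ring
    · simp only [List.map_cons, List.sum_cons]
      rw [ih (List.nodup_cons.1 hnd).2 c hct
        (fun s hs hsc => h0 s (List.mem_cons_of_mem _ hs) hsc),
        h0 x List.mem_cons_self (fun hxc => (List.nodup_cons.1 hnd).1 (hxc ▸ hct))]
      ring

lemma pvColSum_nonneg (land : List (List Int)) (m : Int) (t : ℕ) (j : ℕ) :
    0 ≤ pvColSum land m t j := by
  apply List.sum_nonneg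
  intro x hx
  rw [List.mem_map] at hx
  obtain ⟨s, _, rfl⟩ := hx
  unfold pvSizeI
  positivity

-- one scan step at a cell that is a seed (id = t)
lemma pvColSum_succ_seed {land : List (List Int)} {m : Int} {t j : ℕ} {c : Int × Int}
    (hgc : pvGood land m c) (hid : pvIdm m c = (t : Int)) :
    pvColSum land m (t + 1) j = pvColSum land m t j +
      (if pvSeedb land m c && pvTouchb land m c j then pvSizeI land m c else 0) := by
  unfold pvColSum
  rw [pvSumFilter, pvSumFilter]
  have hpt : ∀ s : Int × Int,
      (if pvSeedb land m s && pvTouchb land m s j && decide (pvIdm m s < ((t+1 : ℕ) : Int))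
        then pvSizeI land m s else 0)
      = (if pvSeedb land m s && pvTouchb land m s j && decide (pvIdm m s < (t : Int))
          then pvSizeI land m s else 0)
      + (if pvSeedb land m s && pvTouchb land m s j && decide (pvIdm m s = (t : Int))
          then pvSizeI land m s else 0) := by
    intro s
    cases h1 : (pvSeedb land m s && pvTouchb land m s j) with
    | false => simp [h1]
    | true =>
      simp only [h1, Bool.true_and]
      by_cases h2 : pvIdm m s < (t : Int)
      · have h3 : pvIdm m s < ((t + 1 : ℕ) : Int) := by push_cast; omega
        have h4 : ¬ (pvIdm m s = (t : Int)) := by omega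
        rw [if_pos (by simpa using h3), if_pos (by simpa using h2),
          if_neg (by simpa using h4)]
        ring
      · by_cases h5 : pvIdm m s = (t : Int)
        · have h3 : pvIdm m s < ((t + 1 : ℕ) : Int) := by push_cast; omega
          rw [if_pos (by simpa using h3), if_neg (by simpa using h2),
            if_pos (by simpa using h5)]
          ring
        · have h3 : ¬ (pvIdm m s < ((t + 1 : ℕ) : Int)) := by push_cast; omega
          rw [if_neg (by simpa using h3), if_neg (by simpa using h2),
            if_neg (by simpa using h5)]
          ring
  calc ((pvCells land m).map (fun s =>
        if pvSeedb land m s && pvTouchb land m s j && decide (pvIdm m s < ((t+1 : ℕ) : Int))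
        then pvSizeI land m s else 0)).sum
      = ((pvCells land m).map (fun s =>
          (if pvSeedb land m s && pvTouchb land m s j && decide (pvIdm m s < (t : Int))
            then pvSizeI land m s else 0)
          + (if pvSeedb land m s && pvTouchb land m s j && decide (pvIdm m s = (t : Int))
              then pvSizeI land m s else 0))).sum := by
        exact congrArg List.sum (List.map_congr_left (fun s _ => hpt s))
    _ = ((pvCells land m).map (fun s =>
          if pvSeedb land m s && pvTouchb land m s j && decide (pvIdm m s < (t : Int))
          then pvSizeI land m s else 0)).sum
        + ((pvCells land m).map (fun s =>
          if pvSeedb land m s && pvTouchb land m s j && decide (pvIdm m s = (t : Int))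
          then pvSizeI land m s else 0)).sum := by
        rw [PySem.List.sum_map_add_int]
    _ = _ := by
        congr 1
        rw [pvSumSingle _ (pvCells land m) (nodup_pvCells land m) c (mem_pvCells.2 hgc)]
        · rw [hid]
          simp
        · intro s hs hsc
          by_cases hcond : pvSeedb land m s && pvTouchb land m s j &&
              decide (pvIdm m s = (t : Int))
          · exfalso
            have hgs : pvGood land m s := mem_pvCells.1 hs
            simp only [Bool.and_eq_true, decide_eq_true_eq] at hcond
            exact hsc (pvIdm_inj' hgs.2.2.1 hgs.2.2.2.1 hgc.2.2.1 hgc.2.2.2.1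
              (by rw [hcond.2, hid]))
          · simp only [Bool.not_eq_true] at hcond
            rw [hcond]
            rfl

-- one scan step at a cell where no new component starts
lemma pvColSum_succ_noseed {land : List (List Int)} {m : Int} {t j : ℕ}
    (h : ∀ s, pvGood land m s → pvIdm m s = (t : Int) → pvSeedb land m s = false) :
    pvColSum land m (t + 1) j = pvColSum land m t j := by
  unfold pvColSum
  apply congrArg
  apply congrArg
  apply List.filter_congr
  intro s hs
  have hgs : pvGood land m s := mem_pvCells.1 hs
  by_cases h5 : pvIdm m s = (t : Int)
  · rw [h s hgs h5]
    simp
  · by_cases h2 : pvIdm m s < (t : Int)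
    · have h3 : pvIdm m s < ((t + 1 : ℕ) : Int) := by push_cast; omega
      rw [show decide (pvIdm m s < ((t + 1 : ℕ) : Int)) = true from by simpa using h3,
        show decide (pvIdm m s < (t : Int)) = true from by simpa using h2]
    · have h3 : ¬ (pvIdm m s < ((t + 1 : ℕ) : Int)) := by push_cast; omega
      rw [show decide (pvIdm m s < ((t + 1 : ℕ) : Int)) = false from by simpa using h3,
        show decide (pvIdm m s < (t : Int)) = false from by simpa using h2]

-- the invariant A's scan maintains: st = (p, v) after the first t cells
def pvInvA (land : List (List Int)) (m : Int) (t : ℕ)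
    (st : List Int × List (Int × Int)) : Prop :=
  st.2.Nodup ∧ (∀ c ∈ st.2, pvGood land m c) ∧
  (∀ c ∈ st.2, ∀ d, pvRel land m c d → d ∈ st.2) ∧
  (∀ c, c ∈ st.2 ↔ pvGood land m c ∧ pvLab land m c < (t : Int)) ∧
  st.1.length = m.toNat ∧
  (∀ j : ℕ, j < m.toNat → st.1[j]? = some (pvColSum land m t j))

lemma pvStepA {land : List (List Int)} {m : Int} (hm0 : 0 ≤ m) {i j : ℕ}
    (hi : i < land.length) (hj : j < m.toNat)
    {st : List Int × List (Int × Int)} (h : pvInvA land m (i * m.toNat + j) st) :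
    pvInvA land m (i * m.toNat + j + 1)
      (if pvGet2 land (i : Int) (j : Int) = 1 ∧ ((i : Int), (j : Int)) ∉ st.2 then
        ((PySem.Set.ofList (pvBfsA land m (2 * land.length * m.toNat + 2)
            [((i : Int), (j : Int))] (st.2 ++ [((i : Int), (j : Int))]) 0 [(j : Int)]).2.2).foldl
          (fun p k => pvBump p k (pvBfsA land m (2 * land.length * m.toNat + 2)
            [((i : Int), (j : Int))] (st.2 ++ [((i : Int), (j : Int))]) 0 [(j : Int)]).2.1) st.1,
         (pvBfsA land m (2 * land.length * m.toNat + 2)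
            [((i : Int), (j : Int))] (st.2 ++ [((i : Int), (j : Int))]) 0 [(j : Int)]).1)
      else st) := by
  obtain ⟨hnd, hgood, hcl, hv, hlen, hp⟩ := h
  have hidm : pvIdm m ((i : Int), (j : Int)) = ((i * m.toNat + j : ℕ) : Int) := by
    unfold pvIdm
    push_cast
    rw [Int.toNat_of_nonneg hm0]
  by_cases hb : pvGet2 land (i : Int) (j : Int) = 1 ∧ ((i : Int), (j : Int)) ∉ st.2
  · rw [if_pos hb]
    have hgc : pvGood land m ((i : Int), (j : Int)) :=
      ⟨by simp, by simp; omega, by simp, by simp; omega, hb.1⟩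
    have hseed : pvLab land m ((i : Int), (j : Int)) = pvIdm m ((i : Int), (j : Int)) := by
      have h1 := pvLab_self_le hgc
      have h2 : ¬ (pvLab land m ((i : Int), (j : Int)) < ((i * m.toNat + j : ℕ) : Int)) :=
        fun hlt => hb.2 ((hv _).2 ⟨hgc, hlt⟩)
      rw [hidm] at h1 ⊢
      omega
    obtain ⟨Δ, heq, hnd', hgood', hcl', hchar⟩ :=
      pvComponentA land m ((i : Int), (j : Int)) st.2 hgc hb.2 hnd hgood hcl
    rw [heq]
    dsimp only
    have hndc : (((i : Int), (j : Int)) :: Δ).Nodup := hnd'.of_append_right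
    have hball : ∀ e, e ∈ ((i : Int), (j : Int)) :: Δ ↔
        e ∈ pvBall land m (pvK land m) ((i : Int), (j : Int)) := by
      intro e
      rw [hchar e, mem_pvBall_K hgc]
    have hsize : (1 : Int) + (Δ.length : Int) = pvSizeI land m ((i : Int), (j : Int)) := by
      have hfin : (((i : Int), (j : Int)) :: Δ).toFinset
          = pvBall land m (pvK land m) ((i : Int), (j : Int)) :=
        Finset.ext fun e => by rw [List.mem_toFinset, hball e]
      unfold pvSizeI
      rw [← hfin, List.toFinset_card_of_nodup hndc]
      simp only [List.length_cons]
      push_cast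
      ring
    have hmemS : ∀ x : Int, x ∈ PySem.Set.ofList ((((i : Int), (j : Int)) :: Δ).map Prod.snd)
        ↔ ∃ e ∈ pvBall land m (pvK land m) ((i : Int), (j : Int)), e.2 = x := by
      intro x
      rw [PySem.Set.mem_ofList, List.mem_map]
      constructor
      · rintro ⟨e, he, rfl⟩
        exact ⟨e, (hball e).1 he, rfl⟩
      · rintro ⟨e, he, rfl⟩
        exact ⟨e, (hball e).2 he, rfl⟩
    refine ⟨hnd', hgood', hcl', ?_, ?_, ?_⟩
    · intro c'
      constructor
      · intro hc'
        rcases List.mem_append.1 hc' with h1 | h1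
        · obtain ⟨hg1, hlt⟩ := (hv c').1 h1
          exact ⟨hg1, by push_cast at hlt ⊢; omega⟩
        · have hr : pvReach land m ((i : Int), (j : Int)) c' := (hchar c').1 h1
          have hg1 : pvGood land m c' := pvReach_good' hgc hr
          have : pvLab land m c' = pvLab land m ((i : Int), (j : Int)) :=
            (pvLab_eq_of_reach hgc hr).symm
          rw [this, hseed, hidm]
          exact ⟨hg1, by push_cast; omega⟩
      · rintro ⟨hg1, hlt⟩
        push_cast at hlt
        by_cases hlt' : pvLab land m c' < ((i * m.toNat + j : ℕ) : Int)
        · exact List.mem_append_left _ ((hv c').2 ⟨hg1, hlt'⟩)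
        · have heqlab : pvLab land m c' = pvLab land m ((i : Int), (j : Int)) := by
            rw [hseed, hidm]
            push_cast
            omega
          have hr : pvReach land m c' ((i : Int), (j : Int)) :=
            (pvLab_eq_iff hg1 hgc).1 heqlab
          exact List.mem_append_right _ ((hchar c').2 (pvReach_symm hg1 hr))
    · rw [pvBumpFold_length, hlen]
    · intro j' hj'
      have hks0 : ∀ k ∈ PySem.Set.ofList ((((i : Int), (j : Int)) :: Δ).map Prod.snd),
          0 ≤ k := by
        intro k hk
        obtain ⟨e, he, rfl⟩ := (hmemS k).1 hk
        exact (pvBall_good hgc he).2.2.1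
      rw [pvBumpFold_getElem? _ _ _ (PySem.Set.nodup_ofList _) hks0, hp j' hj',
        pvColSum_succ_seed hgc hidm]
      have hseedb : pvSeedb land m ((i : Int), (j : Int)) = true := by
        simp [pvSeedb, hseed]
      by_cases ht : pvTouchb land m ((i : Int), (j : Int)) j' = true
      · have htm : (j' : Int) ∈ PySem.Set.ofList ((((i : Int), (j : Int)) :: Δ).map Prod.snd) := by
          rw [hmemS]
          simp only [pvTouchb, decide_eq_true_eq, Finset.mem_image] at ht
          obtain ⟨e, he, hej⟩ := ht
          exact ⟨e, he, hej⟩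
        rw [if_pos htm]
        simp only [Option.map_some, hseedb, ht, Bool.and_self, if_pos]
        rw [hsize]
      · have htm : (j' : Int) ∉ PySem.Set.ofList ((((i : Int), (j : Int)) :: Δ).map Prod.snd) := by
          rw [hmemS]
          rintro ⟨e, he, hej⟩
          exact ht (by simp only [pvTouchb, decide_eq_true_eq, Finset.mem_image]
                       exact ⟨e, he, hej⟩)
        rw [if_neg htm]
        simp only [Bool.not_eq_true] at ht
        simp [hseedb, ht]
  · rw [if_neg hb]
    have hnoseed : ∀ s, pvGood land m s → pvIdm m s = ((i * m.toNat + j : ℕ) : Int) →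
        pvSeedb land m s = false := by
      intro s hgs hids
      have hsc : s = ((i : Int), (j : Int)) := by
        apply pvIdm_inj' hgs.2.2.1 hgs.2.2.2.1 (by simp) (by simp; omega)
        rw [hids, hidm]
      subst hsc
      have hgetc : pvGet2 land (i : Int) (j : Int) = 1 := hgs.2.2.2.2
      have hin : ((i : Int), (j : Int)) ∈ st.2 := by
        by_contra hnin
        exact hb ⟨hgetc, hnin⟩
      have hlt := ((hv _).1 hin).2
      simp only [pvSeedb, decide_eq_false_iff_not]
      rw [hids]
      omega
    refine ⟨hnd, hgood, hcl, ?_, hlen, ?_⟩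
    · intro c'
      rw [hv c']
      constructor
      · rintro ⟨hg1, hlt⟩
        exact ⟨hg1, by push_cast at hlt ⊢; omega⟩
      · rintro ⟨hg1, hlt⟩
        refine ⟨hg1, ?_⟩
        push_cast at hlt
        by_cases hlt' : pvLab land m c' < ((i * m.toNat + j : ℕ) : Int)
        · exact hlt'
        · exfalso
          obtain ⟨e, he, hem⟩ := pvLab_attained hg1
          have hge : pvGood land m e := pvReach_good' hg1 he
          have hlabeq : pvLab land m e = pvLab land m c' :=
            (pvLab_eq_of_reach hg1 he).symm
          have hide : pvIdm m e = ((i * m.toNat + j : ℕ) : Int) := by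
            push_cast
            push_cast at hlt'
            omega
          have hfalse := hnoseed e hge hide
          simp only [pvSeedb, decide_eq_false_iff_not] at hfalse
          exact hfalse (by rw [hlabeq, hem])
    · intro j' hj'
      rw [hp j' hj', pvColSum_succ_noseed hnoseed]


-- A's per-cell scan body (the port's inner loop body, named for the induction)
def pvBodyA (land : List (List Int)) (m : Int) (i : ℕ) :
    (List Int × List (Int × Int)) → ℕ → (List Int × List (Int × Int)) :=
  fun st j =>
    if pvGet2 land (i : Int) (j : Int) = 1 ∧ ((i : Int), (j : Int)) ∉ st.2 then
      let r := pvBfsA land m (2 * land.length * m.toNat + 2)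
        [((i : Int), (j : Int))] (st.2 ++ [((i : Int), (j : Int))]) 0 [(j : Int)]
      ((PySem.Set.ofList r.2.2).foldl (fun p k => pvBump p k r.2.1) st.1, r.1)
    else st

lemma pvInitA (land : List (List Int)) (m : Int) :
    pvInvA land m 0 (List.replicate m.toNat 0, ([] : List (Int × Int))) := by
  have hcz : ∀ j : ℕ, pvColSum land m 0 j = 0 := by
    intro j
    unfold pvColSum
    rw [pvSumFilter]
    apply pvSumZero
    intro s hs
    have hgs := mem_pvCells.1 hs
    have h0 := pvIdm_nonneg hgs
    have hdec : (pvSeedb land m s && pvTouchb land m s j &&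
        decide (pvIdm m s < ((0 : ℕ) : Int))) = false := by
      have : decide (pvIdm m s < ((0 : ℕ) : Int)) = false := by
        simp only [Nat.cast_zero, decide_eq_false_iff_not, not_lt]
        omega
      rw [this, Bool.and_false]
    rw [if_neg (by rw [hdec]; exact Bool.false_ne_true)]
  refine ⟨List.nodup_nil, by simp, by simp, ?_, by simp, ?_⟩
  · intro c
    simp only [List.not_mem_nil, false_iff, not_and, not_lt]
    intro hg
    simpa using pvLab_nonneg hg
  · intro j hj
    rw [List.getElem?_replicate]
    simp [hj, hcz j]

lemma pvScanA (land : List (List Int)) (m : Int) (hm0 : 0 ≤ m) :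
    pvInvA land m (land.length * m.toNat)
      ((List.range land.length).foldl (fun st (i : ℕ) =>
        (List.range m.toNat).foldl (pvBodyA land m i) st)
        (List.replicate m.toNat 0, ([] : List (Int × Int)))) := by
  have hrow : ∀ (i : ℕ), i < land.length → ∀ (jm : ℕ), jm ≤ m.toNat →
      ∀ st, pvInvA land m (i * m.toNat) st →
      pvInvA land m (i * m.toNat + jm) ((List.range jm).foldl (pvBodyA land m i) st) := by
    intro i hi jm
    induction jm with
    | zero => intro _ st h; simpa using h
    | succ jm ih =>
      intro hjm st h
      rw [List.range_succ, List.foldl_append]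
      simp only [List.foldl_cons, List.foldl_nil]
      exact pvStepA hm0 hi (by omega) (ih (by omega) st h)
  have houter : ∀ (nm : ℕ), nm ≤ land.length →
      pvInvA land m (nm * m.toNat)
        ((List.range nm).foldl (fun st (i : ℕ) =>
          (List.range m.toNat).foldl (pvBodyA land m i) st)
          (List.replicate m.toNat 0, ([] : List (Int × Int)))) := by
    intro nm
    induction nm with
    | zero => intro _; simpa using pvInitA land m
    | succ nm ih =>
      intro hnm
      rw [List.range_succ, List.foldl_append]
      simp only [List.foldl_cons, List.foldl_nil]
      have h2 := hrow nm (by omega) m.toNat (le_refl _) _ (ih (by omega))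
      have harith : nm * m.toNat + m.toNat = (nm + 1) * m.toNat := by ring
      rw [harith] at h2
      exact h2
  exact houter land.length (le_refl _)


-- ---------- B's per-column sum equals what A's p[j] holds ----------

-- max(p) (Python) on a nonempty list of nonnegative ints is the running max from 0
lemma pvMax_eq (l : List Int) (hne : l ≠ []) (hnn : ∀ x ∈ l, 0 ≤ x) :
    (PySem.List.max? l (fun z => z)).getD 0 = l.foldl max 0 := by
  cases l with
  | nil => exact absurd rfl hne
  | cons x t =>
    rw [PySem.List.max?_id_cons]
    show t.foldl max x = (x :: t).foldl max 0
    rw [List.foldl_cons]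
    have h0 := hnn x List.mem_cons_self
    have : max 0 x = x := by omega
    rw [this]

-- every good cell's id is below n*m
lemma pvIdm_lt {land : List (List Int)} {m : Int} (hm0 : 0 ≤ m) {s : Int × Int}
    (hgs : pvGood land m s) :
    pvIdm m s < ((land.length * m.toNat : ℕ) : Int) := by
  obtain ⟨h1, h2, h3, h4, _⟩ := hgs
  unfold pvIdm
  push_cast
  rw [Int.toNat_of_nonneg hm0]
  have h5 : s.1 + 1 ≤ (land.length : Int) := by omega
  nlinarith

-- the column loop body of B equals pvColSum at the end of the scan
lemma pvColB_eq (land : List (List Int)) (m : Int) (hm0 : 0 ≤ m) (j : ℕ)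
    {lab : PySem.Dict (Int × Int) Int}
    (hitems : lab.items = (pvCells land m).map (fun c => (c, pvLab land m c))) :
    (PySem.Set.ofList ((PySem.List.pyRange 0 (land.length : Int) 1).filterMap
        (fun i => lab.get? (i, (j : Int))))).foldl
      (fun s r => s + (PySem.List.count lab.values r : Int)) 0
    = pvColSum land m (land.length * m.toNat) j := by
  -- the list of labels seen in column j
  have hLmem : ∀ r : Int,
      (r ∈ (PySem.List.pyRange 0 (land.length : Int) 1).filterMap
        (fun i => lab.get? (i, (j : Int)))) ↔
      ∃ i : ℕ, i < land.length ∧ pvGood land m ((i : Int), (j : Int)) ∧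
        r = pvLab land m ((i : Int), (j : Int)) := by
    intro r
    rw [PySem.List.pyRange_one]
    rw [List.filterMap_map]
    constructor
    · intro hmem
      rw [List.mem_filterMap] at hmem
      obtain ⟨i, hi, hget⟩ := hmem
      rw [List.mem_range] at hi
      simp only [Function.comp, zero_add] at hget
      by_cases hgd : pvGood land m ((i : Int), (j : Int))
      · rw [pvDictGet_good hitems hgd] at hget
        refine ⟨i, by omega, hgd, (Option.some_inj.1 hget).symm⟩
      · rw [pvDictGet_bad hitems hgd] at hget
        cases hget
    · rintro ⟨i, hi, hgd, rfl⟩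
      rw [List.mem_filterMap]
      refine ⟨i, by rw [List.mem_range]; omega, ?_⟩
      simp only [Function.comp, zero_add]
      rw [pvDictGet_good hitems hgd]
  -- count of a label in lab.values
  have hvals : lab.values = (pvCells land m).map (pvLab land m) := by
    show lab.items.map (·.2) = _
    rw [hitems, List.map_map]
    exact List.map_congr_left (fun c _ => rfl)
  have hcount : ∀ r : Int, (PySem.List.count lab.values r : Int) =
      (((pvCells land m).filter (fun c => pvLab land m c == r)).length : Int) := by
    intro r
    rw [PySem.List.count_eq, hvals, List.count_eq_countP, List.countP_map,
      List.countP_eq_length_filter]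
    rfl
  -- seed list of the components touching column j
  have hKnd : (((pvCells land m).filter
      (fun s => pvSeedb land m s && pvTouchb land m s j)).map (pvIdm m)).Nodup := by
    refine List.Nodup.map_on ?_ ((nodup_pvCells land m).filter _)
    intro x hx y hy hxy
    have hgx := mem_pvCells.1 (List.mem_of_mem_filter hx)
    have hgy := mem_pvCells.1 (List.mem_of_mem_filter hy)
    exact pvIdm_inj' hgx.2.2.1 hgx.2.2.2.1 hgy.2.2.1 hgy.2.2.2.1 hxy
  have hperm : (PySem.Set.ofList ((PySem.List.pyRange 0 (land.length : Int) 1).filterMap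
      (fun i => lab.get? (i, (j : Int))))).Perm
      (((pvCells land m).filter
        (fun s => pvSeedb land m s && pvTouchb land m s j)).map (pvIdm m)) := by
    rw [List.perm_ext_iff_of_nodup (PySem.Set.nodup_ofList _) hKnd]
    intro r
    rw [PySem.Set.mem_ofList, hLmem r]
    simp only [List.mem_map, List.mem_filter]
    constructor
    · rintro ⟨i, hi, hgd, rfl⟩
      obtain ⟨e, he, hem⟩ := pvLab_attained hgd
      have hge := pvReach_good' hgd he
      have hlabe : pvLab land m e = pvLab land m ((i : Int), (j : Int)) :=
        (pvLab_eq_of_reach hgd he).symm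
      refine ⟨e, ⟨mem_pvCells.2 hge, ?_⟩, hem.symm⟩
      have hseede : pvSeedb land m e = true := by
        simp only [pvSeedb, decide_eq_true_eq]
        rw [hlabe, hem]
      have htouche : pvTouchb land m e j = true := by
        simp only [pvTouchb, decide_eq_true_eq, Finset.mem_image]
        refine ⟨((i : Int), (j : Int)), ?_, rfl⟩
        rw [mem_pvBall_K hge]
        exact pvReach_symm hgd he
      rw [hseede, htouche]
      rfl
    · rintro ⟨s, ⟨hsc, hcond⟩, rfl⟩
      have hgs := mem_pvCells.1 hsc
      rw [Bool.and_eq_true] at hcond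
      have htch := hcond.2
      simp only [pvTouchb, decide_eq_true_eq, Finset.mem_image] at htch
      obtain ⟨e, he, hej⟩ := htch
      have hre : pvReach land m s e := (mem_pvBall_K hgs e).1 he
      have hge := pvReach_good' hgs hre
      have he1 : ((e.1.toNat : Int), (j : Int)) = e := by
        refine Prod.ext_iff.2 ⟨?_, hej.symm⟩
        show (e.1.toNat : Int) = e.1
        have h1 := hge.1
        omega
      refine ⟨e.1.toNat, ?_, by rw [he1]; exact hge, ?_⟩
      · have h2 := hge.2.1
        have h0 := hge.1
        omega
      · rw [he1]
        have hseeds : pvLab land m s = pvIdm m s := by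
          have := hcond.1
          simpa [pvSeedb] using this
        rw [← (pvLab_eq_of_reach hgs hre), hseeds]
  -- count of a seed's label is its component's size
  have hpoint : ∀ s, pvGood land m s → pvSeedb land m s = true →
      (PySem.List.count lab.values (pvIdm m s) : Int) = pvSizeI land m s := by
    intro s hgs hseeds
    have hlabs : pvLab land m s = pvIdm m s := by simpa [pvSeedb] using hseeds
    rw [hcount]
    have hfeq : ((pvCells land m).filter (fun c => pvLab land m c == pvIdm m s)).toFinset
        = pvBall land m (pvK land m) s := by
      ext e
      rw [List.mem_toFinset, List.mem_filter, mem_pvBall_K hgs]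
      constructor
      · rintro ⟨hec, heq⟩
        have hge := mem_pvCells.1 hec
        have heq' : pvLab land m e = pvIdm m s := by simpa using heq
        have hlabeq : pvLab land m e = pvLab land m s := by rw [heq', hlabs]
        exact pvReach_symm hge ((pvLab_eq_iff hge hgs).1 hlabeq)
      · intro hr
        have hge := pvReach_good' hgs hr
        refine ⟨mem_pvCells.2 hge, ?_⟩
        have : pvLab land m e = pvIdm m s := by
          rw [← pvLab_eq_of_reach hgs hr, hlabs]
        simp [this]
    have hndf := (nodup_pvCells land m).filter (fun c => pvLab land m c == pvIdm m s)
    rw [pvSizeI, ← hfeq, List.toFinset_card_of_nodup hndf]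
  -- assemble
  rw [PySem.List.foldl_add (g := fun r => (PySem.List.count lab.values r : Int))]
  rw [(hperm.map (fun r => (PySem.List.count lab.values r : Int))).sum_eq]
  rw [List.map_map]
  unfold pvColSum
  have hfilt : (pvCells land m).filter (fun s => pvSeedb land m s && pvTouchb land m s j
        && decide (pvIdm m s < ((land.length * m.toNat : ℕ) : Int)))
      = (pvCells land m).filter (fun s => pvSeedb land m s && pvTouchb land m s j) := by
    apply List.filter_congr
    intro s hs
    have hlt := pvIdm_lt hm0 (mem_pvCells.1 hs)
    rw [show decide (pvIdm m s < ((land.length * m.toNat : ℕ) : Int)) = true from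
      by simpa using hlt, Bool.and_true]
  rw [hfilt]
  rw [zero_add]
  apply congrArg
  apply List.map_congr_left
  intro s hs
  have hgs := mem_pvCells.1 (List.mem_of_mem_filter hs)
  have hseeds : pvSeedb land m s = true := by
    have := (List.mem_filter.1 hs).2
    rw [Bool.and_eq_true] at this
    exact this.1
  exact hpoint s hgs hseeds


-- the break-on-fixpoint loop computes the same dict as blindly iterating
lemma pvRoundsB_eq : ∀ (k : ℕ) (lab : PySem.Dict (Int × Int) Int),
    pvRoundsB k lab = pvRoundB^[k] lab := by
  intro k
  induction k with
  | zero => intro lab; rfl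
  | succ k ih =>
    intro lab
    show (if pvRoundB lab = lab then lab else pvRoundsB k (pvRoundB lab)) = _
    by_cases h : pvRoundB lab = lab
    · rw [if_pos h, Function.iterate_succ_apply, h, Function.iterate_fixed h]
    · rw [if_neg h, ih, Function.iterate_succ_apply]

-- ---------- assembling the two values ----------

-- B's final dict, as the port builds it
def pvLabTerm (land : List (List Int)) : PySem.Dict (Int × Int) Int :=
  pvRoundsB ((land.length : Int) * ((PySem.List.pyGetD land 0 []).length : Int)).toNat
    ((List.range land.length).foldl (fun d (i : ℕ) =>
      (List.range ((PySem.List.pyGetD land 0 []).length : Int).toNat).foldl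
        (fun (d : PySem.Dict (Int × Int) Int) (j : ℕ) =>
          if pvGet2 land (i : Int) (j : Int) = 1 then
            d.insert ((i : Int), (j : Int))
              ((i : Int) * ((PySem.List.pyGetD land 0 []).length : Int) + (j : Int))
          else d) d)
      PySem.Dict.empty)

-- B's per-column value
def pvColB (land : List (List Int)) (j : Int) : Int :=
  (PySem.Set.ofList ((PySem.List.pyRange 0 (land.length : Int) 1).filterMap
    (fun i => (pvLabTerm land).get? (i, j)))).foldl
      (fun s r => s + (PySem.List.count (pvLabTerm land).values r : Int)) 0

lemma pvSolutionA_val (land : List (List Int)) :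
    solution land = (PySem.List.max?
      ((List.range land.length).foldl (fun st (i : ℕ) =>
        (List.range ((PySem.List.pyGetD land 0 []).length : Int).toNat).foldl
          (pvBodyA land ((PySem.List.pyGetD land 0 []).length : Int) i) st)
        (List.replicate ((PySem.List.pyGetD land 0 []).length : Int).toNat 0,
          ([] : List (Int × Int)))).1 (fun z => z)).getD 0 := rfl

lemma pvSolutionB_val (land : List (List Int)) :
    solution_alt land = (PySem.List.pyRange 0
        ((PySem.List.pyGetD land 0 []).length : Int) 1).foldl
      (fun best j => max best (pvColB land j)) 0 := rfl

lemma pvLabTerm_items (land : List (List Int)) :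
    (pvLabTerm land).items =
      (pvCells land ((PySem.List.pyGetD land 0 []).length : Int)).map
        (fun c => (c, pvLab land ((PySem.List.pyGetD land 0 []).length : Int) c)) := by
  have hiter : pvLabTerm land =
      pvRoundB^[pvK land ((PySem.List.pyGetD land 0 []).length : Int)]
        ((List.range land.length).foldl (fun d (i : ℕ) =>
          (List.range ((PySem.List.pyGetD land 0 []).length : Int).toNat).foldl
            (fun (d : PySem.Dict (Int × Int) Int) (j : ℕ) =>
              if pvGet2 land (i : Int) (j : Int) = 1 then
                d.insert ((i : Int), (j : Int))
                  ((i : Int) * ((PySem.List.pyGetD land 0 []).length : Int) + (j : Int))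
              else d) d)
          PySem.Dict.empty) := by
    unfold pvLabTerm
    rw [pvRoundsB_eq]
    have hK : ((land.length : Int) * ((PySem.List.pyGetD land 0 []).length : Int)).toNat
        = pvK land ((PySem.List.pyGetD land 0 []).length : Int) := by
      unfold pvK
      have hc : ((land.length : Int) * ((PySem.List.pyGetD land 0 []).length : Int))
          = ((land.length * (PySem.List.pyGetD land 0 []).length : ℕ) : Int) := by
        push_cast
        ring
      rw [hc, Int.toNat_natCast, Int.toNat_natCast]
    rw [hK]
  rw [hiter]
  exact pvLabK_items land _ (pvK land _)

-- ===== VERDICT (by name: the statement is the Claim_ definition above) =====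
theorem solution_spec : Claim_equal_solution := by
  intro land _ hpre
  obtain ⟨-, hm0len, -⟩ := hpre
  unfold Spec_solution
  rw [pvSolutionA_val, pvSolutionB_val]
  set m : Int := ((PySem.List.pyGetD land 0 []).length : Int) with hm
  have hm0 : 0 ≤ m := by rw [hm]; exact Int.natCast_nonneg _
  have hM0 : m.toNat ≠ 0 := by rw [hm, Int.toNat_natCast]; exact hm0len
  -- A's p, entrywise, is pvColSum at the end of the scan
  obtain ⟨-, -, -, -, hlen, hp⟩ := pvScanA land m hm0
  have hplist : ((List.range land.length).foldl (fun st (i : ℕ) =>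
      (List.range m.toNat).foldl (pvBodyA land m i) st)
      (List.replicate m.toNat 0, ([] : List (Int × Int)))).1
      = (List.range m.toNat).map (fun jj => pvColSum land m (land.length * m.toNat) jj) := by
    apply List.ext_getElem?
    intro jj
    by_cases hjj : jj < m.toNat
    · rw [hp jj hjj, List.getElem?_map, List.getElem?_range hjj]
      rfl
    · rw [List.getElem?_eq_none (by rw [hlen]; omega),
        List.getElem?_eq_none (by rw [List.length_map, List.length_range]; omega)]
  have hne : (List.range m.toNat).map
      (fun jj => pvColSum land m (land.length * m.toNat) jj) ≠ [] := by
    simp only [ne_eq, List.map_eq_nil_iff, List.range_eq_nil]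
    exact hM0
  have hnn : ∀ x ∈ (List.range m.toNat).map
      (fun jj => pvColSum land m (land.length * m.toNat) jj), 0 ≤ x := by
    intro x hx
    rw [List.mem_map] at hx
    obtain ⟨jj, -, rfl⟩ := hx
    exact pvColSum_nonneg land m _ jj
  rw [hplist, pvMax_eq _ hne hnn, List.foldl_map]
  -- B's fold, column by column
  have hitems := pvLabTerm_items land
  have hcol : ∀ k : ℕ, pvColB land ((k : Int)) =
      pvColSum land m (land.length * m.toNat) k := by
    intro k
    unfold pvColB
    exact pvColB_eq land m hm0 k hitems
  rw [PySem.List.pyRange_one, sub_zero, List.foldl_map]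
  have hfun : (fun (best : Int) (k : ℕ) => max best (pvColB land ((0 : Int) + (k : Int))))
      = fun (best : Int) (k : ℕ) =>
          max best (pvColSum land m (land.length * m.toNat) k) := by
    funext b k
    rw [zero_add, hcol k]
  rw [hfun]
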